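-- pv_equiv track=rewrite | github.com/rutvijmavani/auto-email | jobs/ats/custom_career.py | _job_object_score
-- ===== SOURCE A (Python) =====
-- def _job_object_score(d):
--     """Score a dict by how much it looks like a complete job object."""
--     if not isinstance(d, dict):
--         return 0
--     score = 0
--     keys_lower = {k.lower().replace("_", "").replace("-", "")
--                   for k in d.keys()}
--     score += len(keys_lower & {"title", "jobtitle", "name"}) * 3
--     score += len(keys_lower & {"description", "jobdescription",
--                                "summary", "responsibilities"}) * 5
--     score += len(keys_lower & {"location", "city", "office"}) * 2
--     score += len(keys_lower & {"salary", "compensation", "pay"}) * 2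
--     score += min(len(d), 20)
--     return score
-- ===== SOURCE B (Python) =====
-- _TABLE = [
--     ("title", 3), ("jobtitle", 3), ("name", 3),
--     ("description", 5), ("jobdescription", 5), ("summary", 5),
--     ("responsibilities", 5),
--     ("location", 2), ("city", 2), ("office", 2),
--     ("salary", 2), ("compensation", 2), ("pay", 2),
-- ]
--
--
-- def _job_object_score(d):
--     """Score a dict by how much it looks like a complete job object."""
--     if not isinstance(d, dict):
--         return 0
--     score = min(len(d), 20)
--     for kw, w in _TABLE:
--         if any(k.lower().replace("_", "").replace("-", "") == kw for k in d):
--             score += w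
--     return score
-- ===== Notes on version B (the rewrite author's own statement) =====
-- stated objective: alternative
-- what changed: Inverts the traversal: instead of building a deduplicated normalized-key set and intersecting it with four keyword sets, B builds no set at all and loops over the 13 fixed keywords, adding each weight once if some raw key of d normalizes to that keyword (correct because a set intersection counts each keyword at most once).
import Mathlib
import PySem

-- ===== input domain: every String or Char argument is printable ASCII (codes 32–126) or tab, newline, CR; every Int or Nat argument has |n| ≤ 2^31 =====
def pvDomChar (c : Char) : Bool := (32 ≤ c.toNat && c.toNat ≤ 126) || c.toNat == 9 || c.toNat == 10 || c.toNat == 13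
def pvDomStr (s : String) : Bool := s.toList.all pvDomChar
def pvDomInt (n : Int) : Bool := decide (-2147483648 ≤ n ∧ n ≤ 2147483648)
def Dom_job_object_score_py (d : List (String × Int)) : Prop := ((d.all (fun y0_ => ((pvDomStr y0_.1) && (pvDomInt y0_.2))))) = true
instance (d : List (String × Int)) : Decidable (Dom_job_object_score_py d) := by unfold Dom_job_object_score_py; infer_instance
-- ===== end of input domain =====

-- B inverts the traversal: it builds no key set at all and instead loops over the 13 fixed
-- keywords, adding each weight once if some raw key of d normalizes to it (objective: alternative).


-- k.lower().replace("_", "").replace("-", "")  (normalization used by both programs)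
def pvNorm (k : String) : String :=
  PySem.Str.replace (PySem.Str.replace (PySem.Str.lower k) "_" "") "-" ""

-- ===== PORT A =====
-- d models the Python dict: its keys are the distinct first components in insertion order.
def job_object_score_py (d : List (String × Int)) : Int :=
  let dkeys : PySem.Set String := PySem.Set.ofList (d.map Prod.fst)
  let keys_lower : PySem.Set String := PySem.Set.ofList (dkeys.map pvNorm)
  let score : Int := 0
  let score := score + PySem.Set.len (PySem.Set.inter keys_lower (PySem.Set.ofList ["title", "jobtitle", "name"])) * 3
  let score := score + PySem.Set.len (PySem.Set.inter keys_lower (PySem.Set.ofList ["description", "jobdescription", "summary", "responsibilities"])) * 5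
  let score := score + PySem.Set.len (PySem.Set.inter keys_lower (PySem.Set.ofList ["location", "city", "office"])) * 2
  let score := score + PySem.Set.len (PySem.Set.inter keys_lower (PySem.Set.ofList ["salary", "compensation", "pay"])) * 2
  let score := score + min (PySem.Set.len dkeys) 20
  score

-- ===== PORT B =====
def pvTable : List (String × Int) :=
  [("title", 3), ("jobtitle", 3), ("name", 3),
   ("description", 5), ("jobdescription", 5), ("summary", 5), ("responsibilities", 5),
   ("location", 2), ("city", 2), ("office", 2),
   ("salary", 2), ("compensation", 2), ("pay", 2)]

-- 'score = min(len(d), 20); for kw, w in _TABLE: if any(norm(k) == kw for k in d): score += w'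
def job_object_score_py_alt (d : List (String × Int)) : Int :=
  pvTable.foldl
    (fun score p =>
      if (d.map Prod.fst).any (fun k => pvNorm k == p.1) then score + p.2 else score)
    (min (PySem.Set.len (PySem.Set.ofList (d.map Prod.fst))) 20)

-- ===== PRECONDITION & SPEC =====
def Spec_job_object_score_py (d : List (String × Int)) (out : Int) : Prop := out = job_object_score_py_alt d
instance (d : List (String × Int)) (out : Int) : Decidable (Spec_job_object_score_py d out) := by unfold Spec_job_object_score_py; infer_instance

-- ===== CLAIM (what is proved, stated in full; the proofs are below) =====
def Claim_equal_job_object_score_py : Prop := ∀ (d : List (String × Int)), Dom_job_object_score_py d → Spec_job_object_score_py d (job_object_score_py d)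

-- ===== LEMMAS AND PROOFS =====

-- counting the members of a nodup list that lie in a nodup list is symmetric
theorem pv_filter_len (s G : List String) (hs : s.Nodup) (hG : G.Nodup) :
    (s.filter (fun x => decide (x ∈ G))).length = (G.filter (fun g => decide (g ∈ s))).length := by
  rw [← List.toFinset_card_of_nodup (hs.filter _), ← List.toFinset_card_of_nodup (hG.filter _)]
  rw [List.toFinset_filter, List.toFinset_filter]
  simp only [decide_eq_true_iff, ← List.mem_toFinset]
  rw [Finset.filter_mem_eq_inter, Finset.filter_mem_eq_inter, Finset.inter_comm]

-- B's existential test over the raw keys equals membership in A's normalized key set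
theorem pv_any_iff (d : List (String × Int)) (kw : String) :
    ((d.map Prod.fst).any (fun k => pvNorm k == kw)) = true ↔
      kw ∈ PySem.Set.ofList ((PySem.Set.ofList (d.map Prod.fst)).map pvNorm) := by
  simp only [List.any_eq_true, beq_iff_eq, PySem.Set.mem_ofList, List.mem_map]

theorem pv_if_add (c : Prop) [Decidable c] (s w : Int) :
    (if c then s + w else s) = s + (if c then w else 0) := by
  split_ifs <;> simp

theorem pv_if3 (c : Prop) [Decidable c] : (if c then (3:Int) else 0) = (if c then (1:Int) else 0) * 3 := by
  split_ifs <;> simp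

theorem pv_if5 (c : Prop) [Decidable c] : (if c then (5:Int) else 0) = (if c then (1:Int) else 0) * 5 := by
  split_ifs <;> simp

theorem pv_if2 (c : Prop) [Decidable c] : (if c then (2:Int) else 0) = (if c then (1:Int) else 0) * 2 := by
  split_ifs <;> simp

-- ===== VERDICT (by name: the statement is the Claim_ definition above) =====
set_option maxHeartbeats 1000000 in
theorem job_object_score_py_spec : Claim_equal_job_object_score_py := by
  intro d _
  have hs : (PySem.Set.ofList ((PySem.Set.ofList (d.map Prod.fst)).map pvNorm)).Nodup :=
    PySem.Set.nodup_ofList _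
  have e1 : PySem.Set.ofList ["title", "jobtitle", "name"] = ["title", "jobtitle", "name"] := by decide
  have e2 : PySem.Set.ofList ["description", "jobdescription", "summary", "responsibilities"] = ["description", "jobdescription", "summary", "responsibilities"] := by decide
  have e3 : PySem.Set.ofList ["location", "city", "office"] = ["location", "city", "office"] := by decide
  have e4 : PySem.Set.ofList ["salary", "compensation", "pay"] = ["salary", "compensation", "pay"] := by decide
  unfold Spec_job_object_score_py job_object_score_py job_object_score_py_alt pvTable
  simp only [List.foldl, pv_any_iff, pv_if_add]
  simp only [PySem.Set.inter, PySem.Set.len, PySem.Set.contains_eq_listContains,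
    e1, e2, e3, e4, List.contains_eq_mem]
  rw [pv_filter_len _ _ hs (by decide), pv_filter_len _ _ hs (by decide),
      pv_filter_len _ _ hs (by decide), pv_filter_len _ _ hs (by decide)]
  simp only [← List.countP_eq_length_filter, List.countP_cons, List.countP_nil, decide_eq_true_iff]
  push_cast
  simp only [pv_if3, pv_if5, pv_if2]
  ring
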